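-- pv_equiv track=rewrite | github.com/Balrog57/rom_downloader | rom_downloader.py | select_database_result
-- ===== SOURCE A (Python) =====
-- def is_minerva_database_result(result: dict) -> bool:
--     """Detecte une entree de shard qui pointe vers un torrent Minerva."""
--     host = (result.get('host') or '').lower()
--     url = (result.get('url') or '').lower()
--     torrent_url = (result.get('torrent_url') or '').lower()
--     return (
--         'minerva-torrent' in host
--         or 'minerva-archive.org' in url
--         or 'minerva-archive.org' in torrent_url
--         or bool(result.get('torrent_path'))
--     )
--
-- def select_database_result(db_results: list) -> dict | None:
--     """Choisit un résultat de la base locale sans utiliser les providers de dernier recours."""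
--     candidates = []
--     for result in db_results:
--         if is_minerva_database_result(result):
--             continue
--         host = (result.get('host') or '').lower()
--         url = (result.get('url') or '').lower()
--         if 'myrient' in host or 'myrient' in url:
--             continue
--         if 'archive.org' in host or 'archive.org' in url:
--             continue
--         candidates.append(result)
--
--     if not candidates:
--         return None
--
--     for result in candidates:
--         host = (result.get('host') or '').lower()
--         url = (result.get('url') or '').lower()
--         if '1fichier.com' in host or '1fichier.com' in url:
--             return result
--
--     return candidates[0]
-- ===== SOURCE B (Python) =====
-- def select_database_result(db_results: list) -> dict | None:
--     """Single pass with early exit: first acceptable 1fichier result wins,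
--     otherwise the first acceptable result, otherwise None."""
--     fallback = None
--     for result in db_results:
--         host = (result.get('host') or '').lower()
--         url = (result.get('url') or '').lower()
--         torrent_url = (result.get('torrent_url') or '').lower()
--         if ('minerva-torrent' in host
--                 or 'minerva-archive.org' in url
--                 or 'minerva-archive.org' in torrent_url
--                 or result.get('torrent_path')
--                 or 'myrient' in host or 'myrient' in url
--                 or 'archive.org' in host or 'archive.org' in url):
--             continue
--         if '1fichier.com' in host or '1fichier.com' in url:
--             return result
--         if fallback is None:
--             fallback = result
--     return fallback
-- ===== Notes on version B (the rewrite author's own statement) =====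
-- stated objective: simpler
-- what changed: Replaces A's two passes (build a filtered candidate list, then rescan it for a 1fichier entry and fall back to candidates[0]) with a single loop that skips excluded entries, returns the first 1fichier entry immediately, and remembers the first acceptable entry as fallback.
import Mathlib
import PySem

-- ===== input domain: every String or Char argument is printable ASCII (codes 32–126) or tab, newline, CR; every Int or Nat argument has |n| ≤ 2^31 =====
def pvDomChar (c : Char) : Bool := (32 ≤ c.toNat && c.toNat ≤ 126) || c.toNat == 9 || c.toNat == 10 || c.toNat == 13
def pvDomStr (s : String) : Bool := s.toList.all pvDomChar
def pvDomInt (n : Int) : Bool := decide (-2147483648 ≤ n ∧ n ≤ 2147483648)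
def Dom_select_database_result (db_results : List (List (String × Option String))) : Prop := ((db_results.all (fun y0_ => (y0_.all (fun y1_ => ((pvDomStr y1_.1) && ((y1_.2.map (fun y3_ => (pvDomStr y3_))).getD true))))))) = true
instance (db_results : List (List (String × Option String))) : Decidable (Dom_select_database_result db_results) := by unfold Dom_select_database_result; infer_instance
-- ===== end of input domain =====

-- B collapses A's build-candidates-then-rescan into one loop with early exit (objective: simpler).

-- (result.get(k) or '')  — missing key and None both give ''
def pvGetOr (r : List (String × Option String)) (k : String) : String :=
  match r.lookup k with
  | some (some s) => s
  | _ => ""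

-- bool(result.get('torrent_path')) — truthy iff present, non-None and non-empty
def pvTruthyGet (r : List (String × Option String)) (k : String) : Bool :=
  !(pvGetOr r k == "")

-- ===== PORT A =====
def is_minerva_database_result (result : List (String × Option String)) : Bool :=
  let host := PySem.Str.lower (pvGetOr result "host")
  let url := PySem.Str.lower (pvGetOr result "url")
  let torrent_url := PySem.Str.lower (pvGetOr result "torrent_url")
  PySem.Str.isIn "minerva-torrent" host
    || PySem.Str.isIn "minerva-archive.org" url
    || PySem.Str.isIn "minerva-archive.org" torrent_url
    || pvTruthyGet result "torrent_path"

-- second loop of A: first candidate with 1fichier.com in host/url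
def pvFindFichier : List (List (String × Option String)) → Option (List (String × Option String))
  | [] => none
  | r :: rs =>
    let host := PySem.Str.lower (pvGetOr r "host")
    let url := PySem.Str.lower (pvGetOr r "url")
    if PySem.Str.isIn "1fichier.com" host || PySem.Str.isIn "1fichier.com" url then some r
    else pvFindFichier rs

def select_database_result (db_results : List (List (String × Option String))) : Option (List (String × Option String)) :=
  let candidates := db_results.foldl (fun acc result =>
    if is_minerva_database_result result then acc
    else
      let host := PySem.Str.lower (pvGetOr result "host")
      let url := PySem.Str.lower (pvGetOr result "url")
      if PySem.Str.isIn "myrient" host || PySem.Str.isIn "myrient" url then acc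
      else if PySem.Str.isIn "archive.org" host || PySem.Str.isIn "archive.org" url then acc
      else acc ++ [result]) []
  if candidates.isEmpty then none
  else
    match pvFindFichier candidates with
    | some r => some r
    | none => candidates.head?

-- ===== PORT B =====
-- B's skip test: the chained 'or' of the first if in Source B
def pvSkipB (result : List (String × Option String)) : Bool :=
  let host := PySem.Str.lower (pvGetOr result "host")
  let url := PySem.Str.lower (pvGetOr result "url")
  let torrent_url := PySem.Str.lower (pvGetOr result "torrent_url")
  PySem.Str.isIn "minerva-torrent" host
    || PySem.Str.isIn "minerva-archive.org" url
    || PySem.Str.isIn "minerva-archive.org" torrent_url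
    || pvTruthyGet result "torrent_path"
    || PySem.Str.isIn "myrient" host || PySem.Str.isIn "myrient" url
    || PySem.Str.isIn "archive.org" host || PySem.Str.isIn "archive.org" url

def pvGoB : List (List (String × Option String)) → Option (List (String × Option String)) → Option (List (String × Option String))
  | [], fallback => fallback
  | result :: rest, fallback =>
    if pvSkipB result then pvGoB rest fallback
    else
      let host := PySem.Str.lower (pvGetOr result "host")
      let url := PySem.Str.lower (pvGetOr result "url")
      if PySem.Str.isIn "1fichier.com" host || PySem.Str.isIn "1fichier.com" url then some result
      else pvGoB rest (if fallback.isNone then some result else fallback)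

def select_database_result_alt (db_results : List (List (String × Option String))) : Option (List (String × Option String)) :=
  pvGoB db_results none

-- ===== PRECONDITION & SPEC =====
def Spec_select_database_result (db_results : List (List (String × Option String))) (out : Option (List (String × Option String))) : Prop := out = select_database_result_alt db_results
instance (db_results : List (List (String × Option String))) (out : Option (List (String × Option String))) : Decidable (Spec_select_database_result db_results out) := by unfold Spec_select_database_result; infer_instance

-- ===== CLAIM (what is proved, stated in full; the proofs are below) =====
def Claim_equal_select_database_result : Prop := ∀ (db_results : List (List (String × Option String))), Dom_select_database_result db_results → Spec_select_database_result db_results (select_database_result db_results)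

-- ===== LEMMAS AND PROOFS =====

-- A's candidate-building fold is a filter by ¬ pvSkipB
theorem foldA_eq_filter (xs : List (List (String × Option String)))
    (acc : List (List (String × Option String))) :
    xs.foldl (fun acc result =>
      if is_minerva_database_result result then acc
      else
        let host := PySem.Str.lower (pvGetOr result "host")
        let url := PySem.Str.lower (pvGetOr result "url")
        if PySem.Str.isIn "myrient" host || PySem.Str.isIn "myrient" url then acc
        else if PySem.Str.isIn "archive.org" host || PySem.Str.isIn "archive.org" url then acc
        else acc ++ [result]) acc
    = acc ++ xs.filter (fun r => !pvSkipB r) := by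
  induction xs generalizing acc with
  | nil => simp
  | cons r rs ih =>
    have hskip : pvSkipB r = (is_minerva_database_result r
        || (PySem.Str.isIn "myrient" (PySem.Str.lower (pvGetOr r "host"))
            || PySem.Str.isIn "myrient" (PySem.Str.lower (pvGetOr r "url")))
        || (PySem.Str.isIn "archive.org" (PySem.Str.lower (pvGetOr r "host"))
            || PySem.Str.isIn "archive.org" (PySem.Str.lower (pvGetOr r "url")))) := by
      simp only [pvSkipB, is_minerva_database_result, Bool.or_assoc]
    rw [List.foldl_cons, List.filter_cons, hskip]
    by_cases h1 : is_minerva_database_result r = true <;>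
      by_cases h2 : (PySem.Str.isIn "myrient" (PySem.Str.lower (pvGetOr r "host"))
        || PySem.Str.isIn "myrient" (PySem.Str.lower (pvGetOr r "url"))) = true <;>
      by_cases h3 : (PySem.Str.isIn "archive.org" (PySem.Str.lower (pvGetOr r "host"))
        || PySem.Str.isIn "archive.org" (PySem.Str.lower (pvGetOr r "url"))) = true <;>
      simp only [h1, h2, h3, Bool.true_or, Bool.or_true, Bool.false_or, Bool.or_false,
        Bool.not_true, Bool.not_false, if_true, if_false, Bool.false_eq_true, ih,
        List.append_assoc, List.singleton_append, List.cons_append, List.nil_append]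

-- B's single loop computes: first 1fichier candidate, else fallback, else first candidate
theorem goB_spec (xs : List (List (String × Option String)))
    (fb : Option (List (String × Option String))) :
    pvGoB xs fb =
      match pvFindFichier (xs.filter (fun r => !pvSkipB r)) with
      | some r => some r
      | none => fb.or (xs.filter (fun r => !pvSkipB r)).head? := by
  induction xs generalizing fb with
  | nil => cases fb <;> simp [pvGoB, pvFindFichier]
  | cons r rs ih =>
    by_cases hs : pvSkipB r
    · simp [pvGoB, hs, List.filter_cons, ih]
    · by_cases hf : (PySem.Str.isIn "1fichier.com" (PySem.Str.lower (pvGetOr r "host"))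
          || PySem.Str.isIn "1fichier.com" (PySem.Str.lower (pvGetOr r "url"))) = true
      · have hfil : (r :: rs).filter (fun x => !pvSkipB x) = r :: rs.filter (fun x => !pvSkipB x) := by
          simp [List.filter_cons, hs]
        rw [hfil]
        simp only [pvGoB, pvFindFichier, if_neg hs, if_pos hf]
      · have hgo : pvGoB (r :: rs) fb = pvGoB rs (if fb.isNone then some r else fb) := by
          simp only [pvGoB, if_neg hs, if_neg hf]
        have hfil : (r :: rs).filter (fun x => !pvSkipB x) = r :: rs.filter (fun x => !pvSkipB x) := by
          simp [List.filter_cons, hs]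
        have hfind : pvFindFichier (r :: rs.filter (fun x => !pvSkipB x))
            = pvFindFichier (rs.filter (fun x => !pvSkipB x)) := by
          simp only [pvFindFichier, if_neg hf]
        rw [hgo, ih, hfil, hfind]
        cases hff : pvFindFichier (rs.filter (fun x => !pvSkipB x)) with
        | some v => simp
        | none => cases fb <;> simp

-- ===== VERDICT (by name: the statement is the Claim_ definition above) =====
theorem select_database_result_spec : Claim_equal_select_database_result := by
  intro db _
  show select_database_result db = select_database_result_alt db
  unfold select_database_result select_database_result_alt
  rw [foldA_eq_filter, goB_spec]
  simp only [List.nil_append]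
  cases hff : pvFindFichier (db.filter (fun r => !pvSkipB r)) with
  | some v =>
    have hne : (db.filter (fun r => !pvSkipB r)) ≠ [] := by
      intro h; rw [h] at hff; simp [pvFindFichier] at hff
    simp [List.isEmpty_iff, hne, hff]
  | none =>
    cases h : db.filter (fun r => !pvSkipB r) with
    | nil => simp [h] at hff ⊢
    | cons a as => simp
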